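-- pv_equiv track=rewrite | github.com/ALearningCurve/ticket-forge | demo/seed_demo_project.py | _username_to_names
-- ===== SOURCE A (Python) =====
-- def _username_to_names(username: str) -> tuple[str, str]:
--   """Derive first and last names from username."""
--   normalized = "".join(ch if ch.isalnum() else " " for ch in username).strip()
--   parts = [part for part in normalized.split() if part]
--   if not parts:
--     return "Demo", "User"
--   first_name = parts[0].capitalize()
--   last_name = " ".join(part.capitalize() for part in parts[1:]) or "User"
--   return first_name, last_name
-- ===== SOURCE B (Python) =====
-- def _names_from_parts(parts):
--   if not parts:
--     return "Demo", "User"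
--   first_name = parts[0].capitalize()
--   last_name = " ".join(p.capitalize() for p in parts[1:]) or "User"
--   return first_name, last_name
--
--
-- def _username_to_names(username: str) -> tuple[str, str]:
--   """Derive first and last names from username (single tokenizing pass)."""
--   parts = []
--   current = []
--   for ch in username:
--     if ch.isalnum():
--       current.append(ch)
--     elif current:
--       parts.append("".join(current))
--       current = []
--   if current:
--     parts.append("".join(current))
--   return _names_from_parts(parts)
-- ===== Notes on version B (the rewrite author's own statement) =====
-- stated objective: simpler
-- what changed: B replaces A's three-stage pipeline (build a normalized copy of the string, strip it, split it on whitespace) by a single tokenizing scan over the characters that collects maximal alnum runs directly, with no intermediate string.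
import Mathlib
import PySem

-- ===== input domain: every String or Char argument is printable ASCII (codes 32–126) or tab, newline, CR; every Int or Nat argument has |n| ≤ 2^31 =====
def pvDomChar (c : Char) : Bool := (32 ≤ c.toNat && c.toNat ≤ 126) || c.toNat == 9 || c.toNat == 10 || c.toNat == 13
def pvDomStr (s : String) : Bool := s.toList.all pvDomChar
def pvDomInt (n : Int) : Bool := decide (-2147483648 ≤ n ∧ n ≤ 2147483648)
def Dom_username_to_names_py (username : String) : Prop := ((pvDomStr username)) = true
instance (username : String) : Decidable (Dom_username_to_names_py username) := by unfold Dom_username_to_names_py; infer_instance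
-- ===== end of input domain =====

-- B replaces A's "normalize to spaces, strip, split" pipeline by a single tokenizing scan
-- over the characters (objective: simpler / one pass, no intermediate string).

-- shared helper: Python str.capitalize (first char upper-cased, rest lowered; exact on ASCII)
def pyCapitalize (w : List Char) : List Char :=
  match w with
  | [] => []
  | c :: cs => PySem.Chars.upperChar c :: PySem.Chars.lower cs

-- ===== PORT A =====
def username_to_names_py (username : String) : String × String :=
  let normalized := PySem.Chars.strip
    (username.toList.map (fun ch => if PySem.Chars.isalnum ch then ch else ' '))
  let parts := (PySem.Chars.split₀ normalized).filter (fun part => !part.isEmpty)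
  match parts with
  | [] => ("Demo", "User")
  | p0 :: rest =>
    let firstName := pyCapitalize p0
    let lastJ := PySem.Chars.join [' '] (rest.map pyCapitalize)
    (String.ofList firstName, String.ofList (if lastJ.isEmpty then "User".toList else lastJ))

-- ===== PORT B =====
-- one step of B's tokenizer loop: state = (parts so far, current buffer)
def tokStep (acc : List (List Char) × List Char) (ch : Char) : List (List Char) × List Char :=
  if PySem.Chars.isalnum ch then (acc.1, acc.2 ++ [ch])
  else if !acc.2.isEmpty then (acc.1 ++ [acc.2], [])
  else acc

-- B's helper _names_from_parts
def namesFromParts (parts : List (List Char)) : String × String :=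
  match parts with
  | [] => ("Demo", "User")
  | p0 :: rest =>
    let firstName := pyCapitalize p0
    let lastJ := PySem.Chars.join [' '] (rest.map pyCapitalize)
    (String.ofList firstName, String.ofList (if lastJ.isEmpty then "User".toList else lastJ))

def username_to_names_py_alt (username : String) : String × String :=
  let st := username.toList.foldl tokStep ([], [])
  namesFromParts (if !st.2.isEmpty then st.1 ++ [st.2] else st.1)

-- ===== PRECONDITION & SPEC =====
def Spec_username_to_names_py (username : String) (out : String × String) : Prop := out = username_to_names_py_alt username
instance (username : String) (out : String × String) : Decidable (Spec_username_to_names_py username out) := by unfold Spec_username_to_names_py; infer_instance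

-- ===== CLAIM (what is proved, stated in full; the proofs are below) =====
def Claim_equal_username_to_names_py : Prop := ∀ (username : String), Dom_username_to_names_py username → Spec_username_to_names_py username (username_to_names_py username)

-- ===== LEMMAS AND PROOFS =====

theorem isspace_of_isalnum (c : Char) (h : PySem.Chars.isalnum c = true) :
    PySem.Chars.isspace c = false := by
  simp [PySem.Chars.isalnum, PySem.Chars.isalpha, PySem.Chars.isdigit, PySem.Chars.isupper,
    PySem.Chars.islower, Char.le_def, UInt32.le_iff_toNat_le, Char.toNat_val] at h
  simp only [PySem.Chars.isspace, Bool.or_eq_false_iff, Bool.and_eq_false_iff,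
    decide_eq_false_iff_not]
  omega

theorem go_acc (s : List Char) : ∀ (cur : List Char) (acc : List (List Char)),
    PySem.Chars.split₀.go s cur acc = acc.reverse ++ PySem.Chars.split₀.go s cur [] := by
  induction s with
  | nil =>
    intro cur acc
    rw [PySem.Chars.split₀.go, PySem.Chars.split₀.go]
    by_cases h : cur.isEmpty <;> simp [h]
  | cons c rest ih =>
    intro cur acc
    rw [PySem.Chars.split₀.go]
    conv_rhs => rw [PySem.Chars.split₀.go]
    by_cases hs : PySem.Chars.isspace c
    · rw [if_pos hs, if_pos hs]
      by_cases hc : cur.isEmpty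
      · rw [if_pos hc, if_pos hc]; exact ih [] acc
      · rw [if_neg hc, if_neg hc, ih [] (cur.reverse :: acc), ih [] [cur.reverse]]
        simp
    · rw [if_neg hs, if_neg hs]; exact ih (c :: cur) acc

theorem go_all_space (w : List Char) (hw : ∀ c ∈ w, PySem.Chars.isspace c = true) :
    ∀ (cur : List Char) (acc : List (List Char)),
    PySem.Chars.split₀.go w cur acc =
      if cur.isEmpty then acc.reverse else (cur.reverse :: acc).reverse := by
  induction w with
  | nil => intro cur acc; rw [PySem.Chars.split₀.go]
  | cons c rest ih =>
    intro cur acc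
    have hc : PySem.Chars.isspace c = true := hw c (by simp)
    have hrest : ∀ x ∈ rest, PySem.Chars.isspace x = true := fun x hx => hw x (by simp [hx])
    rw [PySem.Chars.split₀.go, if_pos hc]
    by_cases hcur : cur.isEmpty
    · rw [if_pos hcur, if_pos hcur, ih hrest]; simp
    · rw [if_neg hcur, if_neg hcur, ih hrest]; simp

theorem go_append_space (t w : List Char) (hw : ∀ c ∈ w, PySem.Chars.isspace c = true) :
    ∀ (cur : List Char) (acc : List (List Char)),
    PySem.Chars.split₀.go (t ++ w) cur acc = PySem.Chars.split₀.go t cur acc := by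
  induction t with
  | nil =>
    intro cur acc
    rw [List.nil_append, go_all_space w hw]
    rw [PySem.Chars.split₀.go]
  | cons c rest ih =>
    intro cur acc
    rw [List.cons_append, PySem.Chars.split₀.go]
    conv_rhs => rw [PySem.Chars.split₀.go]
    by_cases hs : PySem.Chars.isspace c
    · rw [if_pos hs, if_pos hs]
      by_cases hc : cur.isEmpty
      · rw [if_pos hc, if_pos hc, ih]
      · rw [if_neg hc, if_neg hc, ih]
    · rw [if_neg hs, if_neg hs, ih]

theorem go_dropWhile (s : List Char) (acc : List (List Char)) :
    PySem.Chars.split₀.go (List.dropWhile PySem.Chars.isspace s) [] acc =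
      PySem.Chars.split₀.go s [] acc := by
  induction s with
  | nil => rfl
  | cons c rest ih =>
    by_cases hs : PySem.Chars.isspace c
    · rw [List.dropWhile_cons_of_pos hs, ih]
      conv_rhs => rw [PySem.Chars.split₀.go]
      simp [hs]
    · rw [List.dropWhile_cons_of_neg (by simp [hs])]

theorem split₀_strip (s : List Char) :
    PySem.Chars.split₀ (PySem.Chars.strip s) = PySem.Chars.split₀ s := by
  unfold PySem.Chars.strip PySem.Chars.rstrip PySem.Chars.lstrip PySem.Chars.split₀
  have key : ∀ t : List Char,
      PySem.Chars.split₀.go (List.dropWhile PySem.Chars.isspace t.reverse).reverse [] [] =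
        PySem.Chars.split₀.go t [] [] := by
    intro t
    conv_rhs =>
      rw [show t = (List.dropWhile PySem.Chars.isspace t.reverse).reverse ++
          (List.takeWhile PySem.Chars.isspace t.reverse).reverse by
        rw [← List.reverse_append, List.takeWhile_append_dropWhile, List.reverse_reverse]]
    rw [go_append_space _ _ (fun c hc => List.mem_takeWhile_imp (List.mem_reverse.mp hc))]
  rw [key, go_dropWhile]

theorem go_nonempty (s : List Char) : ∀ (cur : List Char) (acc : List (List Char)),
    (∀ x ∈ acc, x ≠ []) → ∀ x ∈ PySem.Chars.split₀.go s cur acc, x ≠ [] := by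
  induction s with
  | nil =>
    intro cur acc hacc x hx
    rw [PySem.Chars.split₀.go] at hx
    by_cases hc : cur.isEmpty
    · rw [if_pos hc] at hx; exact hacc x (List.mem_reverse.mp hx)
    · rw [if_neg hc] at hx
      rcases List.mem_cons.mp (List.mem_reverse.mp hx) with h | h
      · subst h; simp [List.isEmpty_iff] at hc; simp [hc]
      · exact hacc x h
  | cons c rest ih =>
    intro cur acc hacc x hx
    rw [PySem.Chars.split₀.go] at hx
    by_cases hs : PySem.Chars.isspace c
    · rw [if_pos hs] at hx
      by_cases hc : cur.isEmpty
      · rw [if_pos hc] at hx; exact ih [] acc hacc x hx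
      · rw [if_neg hc] at hx
        refine ih [] (cur.reverse :: acc) ?_ x hx
        intro y hy
        rcases List.mem_cons.mp hy with h | h
        · subst h; simp [List.isEmpty_iff] at hc; simp [hc]
        · exact hacc y h
    · rw [if_neg hs] at hx; exact ih (c :: cur) acc hacc x hx

-- main tokenizer invariant: B's loop state vs A's split₀.go on the normalized suffix
theorem tok_go (cs : List Char) : ∀ (parts : List (List Char)) (cur : List Char),
    (if !(cs.foldl tokStep (parts, cur)).2.isEmpty
      then (cs.foldl tokStep (parts, cur)).1 ++ [(cs.foldl tokStep (parts, cur)).2]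
      else (cs.foldl tokStep (parts, cur)).1) =
    parts ++ PySem.Chars.split₀.go
      (cs.map (fun ch => if PySem.Chars.isalnum ch then ch else ' ')) cur.reverse [] := by
  induction cs with
  | nil =>
    intro parts cur
    rw [List.foldl_nil, List.map_nil, PySem.Chars.split₀.go]
    by_cases hc : cur.isEmpty
    · simp [List.isEmpty_iff.mp hc]
    · simp only [List.isEmpty_reverse, hc]
      simp
  | cons c rest ih =>
    intro parts cur
    rw [List.foldl_cons, List.map_cons]
    by_cases ha : PySem.Chars.isalnum c
    · have hns : PySem.Chars.isspace c = false := isspace_of_isalnum c ha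
      have h1 : tokStep (parts, cur) c = (parts, cur ++ [c]) := by simp [tokStep, ha]
      rw [h1]
      conv_rhs => rw [if_pos ha, PySem.Chars.split₀.go,
        if_neg (show ¬(PySem.Chars.isspace c = true) by simp [hns])]
      simpa using ih parts (cur ++ [c])
    · have hsp : PySem.Chars.isspace ' ' = true := by decide
      conv_rhs => rw [if_neg ha, PySem.Chars.split₀.go, if_pos hsp]
      by_cases hc : cur = []
      · subst hc
        have h1 : tokStep (parts, []) c = (parts, []) := by simp [tokStep, ha]
        rw [h1]
        have h2 : (List.reverse ([] : List Char)).isEmpty = true := rfl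
        conv_rhs => rw [if_pos h2]
        exact ih parts []
      · have h1 : tokStep (parts, cur) c = (parts ++ [cur], []) := by simp [tokStep, ha, hc]
        rw [h1]
        have h2 : ¬((cur.reverse).isEmpty = true) := by simp [hc]
        conv_rhs => rw [if_neg h2]
        rw [go_acc]
        have h3 := ih (parts ++ [cur]) []
        simp only [List.reverse_nil] at h3
        rw [h3]
        simp

theorem filter_split₀ (s : List Char) :
    (PySem.Chars.split₀ s).filter (fun part => !part.isEmpty) = PySem.Chars.split₀ s := by
  apply List.filter_eq_self.mpr
  intro x hx
  simp only [Bool.not_eq_eq_eq_not, Bool.not_true, List.isEmpty_eq_false_iff]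
  unfold PySem.Chars.split₀ at hx
  exact go_nonempty s [] [] (by simp) x hx

-- ===== VERDICT (by name: the statement is the Claim_ definition above) =====
theorem username_to_names_py_spec : Claim_equal_username_to_names_py := by
  intro u _
  unfold Spec_username_to_names_py
  simp only [username_to_names_py, username_to_names_py_alt]
  rw [split₀_strip, filter_split₀]
  rw [tok_go u.toList [] []]
  rfl
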